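-- pv_equiv track=rewrite | github.com/AdrianLangseth/NTNU | IT3030/Project2/data_generator.py | check_modular_diff
-- ===== SOURCE A (Python) =====
-- def check_modular_diff(patterns: tuple, modular: int):
--     """
--     Helper function to evaluate whether any patterns are congruent in respect to the size. If they are, their effects
--     will be indistinguishable from each other.
--     :param patterns: The data generation patterns as a tuple of integers.
--     :param modular: The length of the data.
--     :return: bool indicating whether the patterns are usable(not congruent in respect to data size)
--     """
--
--     mods = []
--     for num in patterns:
--         x = num % modular
--         if x in mods:
--             return False
--         mods.append(x)
--     return True
-- ===== SOURCE B (Python) =====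
-- def check_modular_diff(patterns: tuple, modular: int):
--     residues = [n % modular for n in patterns]
--     return len(set(residues)) == len(residues)
-- ===== Notes on version B (the rewrite author's own statement) =====
-- stated objective: simpler
-- what changed: Replaces the incremental seen-list with membership test and early return by building the full residue list once and comparing the cardinality of its set of distinct elements with its length.
import Mathlib
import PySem

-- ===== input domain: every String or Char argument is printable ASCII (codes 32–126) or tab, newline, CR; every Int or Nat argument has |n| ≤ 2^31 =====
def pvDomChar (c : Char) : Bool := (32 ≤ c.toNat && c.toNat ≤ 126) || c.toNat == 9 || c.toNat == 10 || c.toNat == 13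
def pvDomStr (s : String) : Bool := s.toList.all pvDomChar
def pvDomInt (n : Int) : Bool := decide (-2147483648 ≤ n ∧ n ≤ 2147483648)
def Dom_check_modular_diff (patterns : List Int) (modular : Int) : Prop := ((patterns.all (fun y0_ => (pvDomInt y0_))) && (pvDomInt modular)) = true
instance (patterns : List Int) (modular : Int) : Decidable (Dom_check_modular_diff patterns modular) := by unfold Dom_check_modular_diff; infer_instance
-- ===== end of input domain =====

-- B builds the full residue list once and decides by comparing the count of distinct residues
-- with the list length, instead of A's incremental seen-list with early return (objective: simpler).


-- ===== PORT A =====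
-- A's loop: walk the patterns, keep the residues seen so far; return False on a repeat.
def checkModularLoop (modular : Int) : List Int → List Int → Bool
  | [], _ => true
  | num :: rest, mods =>
    let x := PySem.Int.mod num modular
    if mods.contains x then false
    else checkModularLoop modular rest (mods ++ [x])

def check_modular_diff (patterns : List Int) (modular : Int) : Bool :=
  checkModularLoop modular patterns []

-- ===== PORT B =====
def check_modular_diff_alt (patterns : List Int) (modular : Int) : Bool :=
  let residues := patterns.map (fun n => PySem.Int.mod n modular)
  (PySem.Set.ofList residues).length == residues.length

-- ===== PRECONDITION & SPEC =====
-- Pre_ excludes exactly the inputs where Python raises ZeroDivisionError (n % 0): modular = 0 with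
-- at least one pattern; both A and B raise there.
def Pre_check_modular_diff (patterns : List Int) (modular : Int) : Prop :=
  modular ≠ 0 ∨ patterns = []
instance (patterns : List Int) (modular : Int) : Decidable (Pre_check_modular_diff patterns modular) := by unfold Pre_check_modular_diff; infer_instance

def pvWitness_check_modular_diff : List Int × Int := ([3, 5, 9], 4)

def Spec_check_modular_diff (patterns : List Int) (modular : Int) (out : Bool) : Prop := out = check_modular_diff_alt patterns modular
instance (patterns : List Int) (modular : Int) (out : Bool) : Decidable (Spec_check_modular_diff patterns modular out) := by unfold Spec_check_modular_diff; infer_instance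

-- ===== CLAIM (what is proved, stated in full; the proofs are below) =====
def Claim_equal_check_modular_diff : Prop := ∀ (patterns : List Int) (modular : Int), Dom_check_modular_diff patterns modular → Pre_check_modular_diff patterns modular → Spec_check_modular_diff patterns modular (check_modular_diff patterns modular)

-- ===== LEMMAS AND PROOFS =====

-- set(xs), built by folding Set.add, is a sublist of its source.
lemma foldl_add_sublist (l s : List Int) :
    (List.foldl PySem.Set.add s l).Sublist (s ++ l) := by
  induction l generalizing s with
  | nil => simp
  | cons x l ih =>
    have h1 : (List.foldl PySem.Set.add (PySem.Set.add s x) l).Sublist (PySem.Set.add s x ++ l) := ih _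
    have h2 : (PySem.Set.add s x ++ l).Sublist (s ++ x :: l) := by
      by_cases hx : x ∈ s
      · rw [PySem.Set.add_of_mem hx]
        exact (List.sublist_cons_self x l).append_left s
      · rw [PySem.Set.add_of_not_mem hx, List.append_assoc]
        simp
    simpa using h1.trans h2

lemma length_ofList_eq_iff (l : List Int) :
    ((PySem.Set.ofList l).length = l.length) ↔ l.Nodup := by
  constructor
  · intro h
    have hsub : (PySem.Set.ofList l).Sublist l := by
      simpa using foldl_add_sublist l []
    have : PySem.Set.ofList l = l := hsub.eq_of_length h
    rw [← this]
    exact PySem.Set.nodup_ofList l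
  · intro h
    rw [PySem.Set.ofList_eq_self_of_nodup l h]

-- A's loop decides Nodup of the residues, given the accumulated seen-list is duplicate-free.
lemma checkModularLoop_eq (modular : Int) (rest : List Int) :
    ∀ mods : List Int, mods.Nodup →
      checkModularLoop modular rest mods
        = decide ((mods ++ rest.map (fun n => PySem.Int.mod n modular)).Nodup) := by
  induction rest with
  | nil => intro mods h; simp [checkModularLoop, h]
  | cons num rest ih =>
    intro mods h
    rw [checkModularLoop]
    by_cases hx : PySem.Int.mod num modular ∈ mods
    · simp only [List.contains_iff_mem, hx, if_pos]
      have hnot : ¬ (mods ++ PySem.Int.mod num modular :: rest.map (fun n => PySem.Int.mod n modular)).Nodup := by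
        intro hn
        exact List.disjoint_of_nodup_append hn hx (by simp)
      simp [hnot]
    · simp only [List.contains_iff_mem, hx, if_false]
      have hnodup : (mods ++ [PySem.Int.mod num modular]).Nodup := by
        refine List.Nodup.append h (by simp) ?_
        intro a ha hb
        simp only [List.mem_singleton] at hb
        exact hx (hb ▸ ha)
      rw [ih _ hnodup]
      congr 1
      simp [List.append_assoc]

-- ===== VERDICT (by name: the statement is the Claim_ definition above) =====
theorem check_modular_diff_spec : Claim_equal_check_modular_diff := by
  intro patterns modular _ _
  unfold Spec_check_modular_diff check_modular_diff check_modular_diff_alt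
  rw [checkModularLoop_eq modular patterns [] List.nodup_nil]
  simp only [List.nil_append]
  rw [Bool.eq_iff_iff]
  simp only [decide_eq_true_eq, beq_iff_eq]
  exact (length_ofList_eq_iff _).symm
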